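-- pv_equiv track=rewrite | github.com/tr1ten/DNA | companies/random/Parenthesize.py | solve
-- ===== SOURCE A (Python) =====
-- def solve(s:str):
--     if not s: return ""
--     if 'and' not in s:
--         if 'or' not in s: return s.strip()
--         sp = s.split('or')
--         ans = sp[0].strip()
--         for i in range(1,len(sp)):
--             ans = '(' + ans + ' or ' + sp[i].strip() + ')';
--         return ans.strip()
--     else:
--         sp = s.split('and')
--         ans = solve(sp[0])
--         for i in range(1,len(sp)):
--             ans += ' and ' + solve(sp[i])
--         return ans.strip()
-- ===== SOURCE B (Python) =====
-- def solve(s: str):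
--     if not s:
--         return ""
--
--     def close(cur, buf):
--         p = ''.join(buf).strip()
--         return p if cur is None else '(' + cur + ' or ' + p + ')'
--
--     out = []      # completed 'and'-chunks, in order
--     cur = None    # or-chain of the chunk being scanned (None: no 'or' closed yet)
--     buf = []      # characters of the piece currently being scanned
--     i, n = 0, len(s)
--     while i < n:
--         if s.startswith('and', i):
--             out.append(close(cur, buf))
--             cur, buf = None, []
--             i += 3
--         elif s.startswith('or', i):
--             cur, buf = close(cur, buf), []
--             i += 2
--         else:
--             buf.append(s[i])
--             i += 1
--     out.append(close(cur, buf))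
--     return ' and '.join(out).strip()
-- ===== Notes on version B (the rewrite author's own statement) =====
-- stated objective: alternative
-- what changed: A recursively splits the string on the conjunction keyword and each piece again on the disjunction keyword, rebuilding with accumulation loops; B never splits and never recurses: it makes a single left-to-right character scan, a state machine that matches the two keyword literals in place and maintains (finished chunks, current disjunction chain, current piece buffer).
import Mathlib
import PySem

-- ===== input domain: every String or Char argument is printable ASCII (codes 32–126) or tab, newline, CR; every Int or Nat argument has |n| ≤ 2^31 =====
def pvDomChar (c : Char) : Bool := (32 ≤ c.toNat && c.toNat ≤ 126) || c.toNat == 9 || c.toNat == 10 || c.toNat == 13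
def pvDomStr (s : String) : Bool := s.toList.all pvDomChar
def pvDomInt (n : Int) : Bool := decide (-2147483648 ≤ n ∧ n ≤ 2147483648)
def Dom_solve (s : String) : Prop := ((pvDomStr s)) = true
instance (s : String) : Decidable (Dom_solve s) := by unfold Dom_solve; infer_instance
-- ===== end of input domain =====

-- B replaces A's recursive split('and')/split('or') decomposition by a single left-to-right
-- character scan (a state machine matching the literals in place); objective: alternative.

-- ===== PORT A =====
-- Shared string literals of both programs ('and', 'or', ' and ', ' or ').
def andL : List Char := ['a', 'n', 'd']
def orL : List Char := ['o', 'r']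
def sAndL : List Char := [' ', 'a', 'n', 'd', ' ']
def sOrL : List Char := [' ', 'o', 'r', ' ']

-- Unfolding equations of PySem's split scanner (definitional; cited throughout).
theorem pvGo_zero (sep l cur acc) : PySem.Chars.splitOn.go sep 0 l cur acc =
    ((cur.reverse ++ l) :: acc).reverse := rfl
theorem pvGo_succ_nil (sep f cur acc) : PySem.Chars.splitOn.go sep (f+1) [] cur acc =
    (cur.reverse :: acc).reverse := rfl
theorem pvGo_succ_cons (sep f c rest cur acc) : PySem.Chars.splitOn.go sep (f+1) (c::rest) cur acc =
    if sep.isPrefixOf (c::rest) then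
      PySem.Chars.splitOn.go sep f (List.drop sep.length (c::rest)) [] (cur.reverse :: acc)
    else PySem.Chars.splitOn.go sep f rest (c::cur) acc := rfl
theorem pvSplitOn_eq_go (s sep : List Char) :
    PySem.Chars.splitOn s sep = PySem.Chars.splitOn.go sep (s.length+1) s [] [] := rfl

-- A recurses on the pieces of s.split('and'); the next facts about the scanner justify
-- termination (each piece is strictly shorter when 'and' occurs in s, and a split is never
-- empty); the port's termination proof cites them.
theorem pvGo_len_ge_one (sep : List Char) (fuel : Nat) :
    ∀ (l cur : List Char) (acc : List (List Char)),
      acc.length + 1 ≤ (PySem.Chars.splitOn.go sep fuel l cur acc).length := by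
  induction fuel with
  | zero => intro l cur acc; rw [pvGo_zero]; simp
  | succ f ih =>
      intro l cur acc
      cases l with
      | nil => rw [pvGo_succ_nil]; simp
      | cons c rest =>
          rw [pvGo_succ_cons]
          split_ifs with h
          · have := ih (List.drop sep.length (c :: rest)) [] (cur.reverse :: acc)
            simp only [List.length_cons] at this; omega
          · exact ih rest (c :: cur) acc

theorem pvSplitOn_ne_nil (s sep : List Char) : PySem.Chars.splitOn s sep ≠ [] := by
  have := pvGo_len_ge_one sep (s.length+1) s [] []
  rw [pvSplitOn_eq_go]
  intro h; rw [h] at this; simp at this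

theorem pvGo_part_le (sep : List Char) (fuel : Nat) :
    ∀ (l cur : List Char) (acc : List (List Char)) (p : List Char),
      p ∈ PySem.Chars.splitOn.go sep fuel l cur acc →
      p ∈ acc ∨ p.length ≤ cur.length + l.length := by
  induction fuel with
  | zero =>
      intro l cur acc p hp
      rw [pvGo_zero, List.mem_reverse, List.mem_cons] at hp
      rcases hp with hp | hp
      · right; subst hp; simp
      · left; exact hp
  | succ f ih =>
      intro l cur acc p hp
      cases l with
      | nil =>
          rw [pvGo_succ_nil, List.mem_reverse, List.mem_cons] at hp
          rcases hp with hp | hp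
          · right; subst hp; simp
          · left; exact hp
      | cons c rest =>
          rw [pvGo_succ_cons] at hp
          split_ifs at hp with h
          · rcases ih _ _ _ _ hp with hp | hp
            · rw [List.mem_cons] at hp
              rcases hp with hp | hp
              · right; subst hp; simp only [List.length_reverse, List.length_cons]; omega
              · left; exact hp
            · right
              have h1 : (List.drop sep.length (c :: rest)).length = (c :: rest).length - sep.length :=
                List.length_drop
              simp only [List.length_nil, List.length_cons] at hp h1 ⊢
              omega
          · rcases ih _ _ _ _ hp with hp | hp
            · left; exact hp
            · right; simp only [List.length_cons] at hp ⊢; omega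

theorem pvGo_part_lt (sep : List Char) (hsep : sep ≠ []) (fuel : Nat) :
    ∀ (l cur : List Char) (acc : List (List Char)) (p : List Char),
      sep <:+: l → l.length ≤ fuel →
      p ∈ PySem.Chars.splitOn.go sep fuel l cur acc →
      p ∈ acc ∨ p.length < cur.length + l.length := by
  induction fuel with
  | zero =>
      intro l cur acc p hinf hlen _
      have : l = [] := by cases l <;> simp_all
      rw [this] at hinf
      exact absurd (List.infix_nil.mp hinf) hsep
  | succ f ih =>
      intro l cur acc p hinf hlen hp
      cases l with
      | nil => exact absurd (List.infix_nil.mp hinf) hsep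
      | cons c rest =>
          rw [pvGo_succ_cons] at hp
          split_ifs at hp with h
          · have hlrest : sep.length ≤ (c :: rest).length :=
              (List.isPrefixOf_iff_prefix.mp h).length_le
            have hsl : 1 ≤ sep.length := by cases sep <;> simp_all
            rcases pvGo_part_le sep f _ _ _ _ hp with hp | hp
            · rw [List.mem_cons] at hp
              rcases hp with hp | hp
              · right; subst hp; simp only [List.length_reverse, List.length_cons]; omega
              · left; exact hp
            · right
              have h1 : (List.drop sep.length (c :: rest)).length = (c :: rest).length - sep.length :=
                List.length_drop
              simp only [List.length_nil, List.length_cons] at hp h1 ⊢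
              omega
          · have hnpre : ¬ sep <+: (c :: rest) := fun hc => h (List.isPrefixOf_iff_prefix.mpr hc)
            have hrest : sep <:+: rest := by
              rcases List.infix_cons_iff.mp hinf with hc | hc
              · exact absurd hc hnpre
              · exact hc
            rcases ih rest (c :: cur) acc p hrest (by simp only [List.length_cons] at hlen; omega) hp with hp | hp
            · left; exact hp
            · right; simp only [List.length_cons] at hp ⊢; omega

theorem pvSplitOn_part_lt (s sep p : List Char) (hsep : sep ≠ []) (hinf : sep <:+: s)
    (hp : p ∈ PySem.Chars.splitOn s sep) : p.length < s.length := by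
  rw [pvSplitOn_eq_go] at hp
  rcases pvGo_part_lt sep hsep (s.length+1) s [] [] p hinf (by omega) hp with h | h
  · simp at h
  · simpa using h

theorem pvHeadD_mem {α : Type} (l : List α) (d : α) (h : l ≠ []) : l.headD d ∈ l := by
  cases l with
  | nil => exact absurd rfl h
  | cons a t => simp

-- Port of A: the recursive `solve`, on code-point lists (all string work is Chars-level).
def solveChars (s : List Char) : List Char :=
  if hs : s = [] then []
  else if hand : PySem.Chars.isIn andL s = false then
    if hor : PySem.Chars.isIn orL s = false then PySem.Chars.strip s
    else
      let sp := PySem.Chars.splitOn s orL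
      let ans := PySem.Chars.strip (sp.headD [])
      PySem.Chars.strip
        (sp.tail.foldl (fun ans p => '(' :: (ans ++ sOrL ++ PySem.Chars.strip p ++ [')'])) ans)
  else
    let sp := PySem.Chars.splitOn s andL
    PySem.Chars.strip
      (sp.tail.attach.foldl (fun ans p => ans ++ sAndL ++ solveChars p.1)
        (solveChars (sp.headD [])))
termination_by s.length
decreasing_by
  · exact pvSplitOn_part_lt s andL _ (by simp [andL])
      ((PySem.Chars.isIn_iff_infix andL s).mp
        (by revert hand; cases PySem.Chars.isIn andL s <;> simp))
      (List.mem_of_mem_tail p.2)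
  · exact pvSplitOn_part_lt s andL _ (by simp [andL])
      ((PySem.Chars.isIn_iff_infix andL s).mp
        (by revert hand; cases PySem.Chars.isIn andL s <;> simp))
      (pvHeadD_mem _ _ (pvSplitOn_ne_nil s andL))

def solve (s : String) : String := String.ofList (solveChars s.toList)

-- ===== PORT B =====
-- Source B's `close`: finish the current piece (strip it) and attach it to the or-chain.
def closeChunk (cur : Option (List Char)) (p : List Char) : List Char :=
  match cur with
  | none => p
  | some c => '(' :: (c ++ sOrL ++ p ++ [')'])

-- Source B's while loop: one pass over the characters; state = (finished and-chunks, reversed;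
-- current or-chain; reversed buffer of the piece being scanned).
def scanB (s : List Char) (out : List (List Char)) (cur : Option (List Char))
    (buf : List Char) : List Char :=
  match s with
  | [] =>
      PySem.Chars.strip (PySem.Chars.join sAndL
        ((closeChunk cur (PySem.Chars.strip buf.reverse) :: out).reverse))
  | c :: rest =>
      if andL.isPrefixOf (c :: rest) then
        scanB ((c :: rest).drop 3) (closeChunk cur (PySem.Chars.strip buf.reverse) :: out) none []
      else if orL.isPrefixOf (c :: rest) then
        scanB ((c :: rest).drop 2) out (some (closeChunk cur (PySem.Chars.strip buf.reverse))) []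
      else scanB rest out cur (c :: buf)
termination_by s.length
decreasing_by
  · simp only [List.length_drop, List.length_cons]; omega
  · simp only [List.length_drop, List.length_cons]; omega
  · simp

def solveAltChars (s : List Char) : List Char :=
  if s = [] then [] else scanB s [] none []

def solve_alt (s : String) : String := String.ofList (solveAltChars s.toList)

-- ===== PRECONDITION & SPEC =====
def Spec_solve (s : String) (out : String) : Prop := out = solve_alt s
instance (s : String) (out : String) : Decidable (Spec_solve s out) := by unfold Spec_solve; infer_instance

-- ===== CLAIM (what is proved, stated in full; the proofs are below) =====
def Claim_equal_solve : Prop := ∀ (s : String), Dom_solve s → Spec_solve s (solve s)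

-- ===== LEMMAS AND PROOFS =====
-- Fuel irrelevance of the scanner (any fuel ≥ the list length gives the same result).
theorem pvGo_fuel (sep : List Char) (hsep : sep ≠ []) :
    ∀ (f g : Nat) (l cur : List Char) (acc : List (List Char)), l.length ≤ f → l.length ≤ g →
      PySem.Chars.splitOn.go sep f l cur acc = PySem.Chars.splitOn.go sep g l cur acc := by
  intro f
  induction f with
  | zero =>
      intro g l cur acc hf hg
      have hl : l = [] := by cases l <;> simp_all
      subst hl
      cases g with
      | zero => rfl
      | succ g => rw [pvGo_zero, pvGo_succ_nil]; simp
  | succ f ih =>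
      intro g l cur acc hf hg
      cases l with
      | nil =>
          cases g with
          | zero => rw [pvGo_zero, pvGo_succ_nil]; simp
          | succ g => rfl
      | cons c rest =>
          cases g with
          | zero => simp at hg
          | succ g =>
              rw [pvGo_succ_cons, pvGo_succ_cons]
              have hsl : 1 ≤ sep.length := by cases sep <;> simp_all
              split_ifs with h
              · have hd : (List.drop sep.length (c :: rest)).length =
                    (c :: rest).length - sep.length := List.length_drop
                refine ih g _ _ _ ?_ ?_ <;>
                  simp only [List.length_cons] at hd hf hg ⊢ <;> omega
              · refine ih g _ _ _ ?_ ?_ <;>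
                  simp only [List.length_cons] at hf hg <;> omega

-- The accumulator only prepends (reversed) to the result.
theorem pvGo_acc (sep : List Char) :
    ∀ (f : Nat) (l cur : List Char) (acc : List (List Char)),
      PySem.Chars.splitOn.go sep f l cur acc =
        acc.reverse ++ PySem.Chars.splitOn.go sep f l cur [] := by
  intro f
  induction f with
  | zero => intro l cur acc; rw [pvGo_zero, pvGo_zero]; simp
  | succ f ih =>
      intro l cur acc
      cases l with
      | nil => rw [pvGo_succ_nil, pvGo_succ_nil]; simp
      | cons c rest =>
          rw [pvGo_succ_cons, pvGo_succ_cons]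
          split_ifs with h
          · rw [ih _ _ (cur.reverse :: acc), ih _ _ ([cur.reverse])]
            simp
          · rw [ih rest (c :: cur) acc]

-- The pending buffer only prepends to the first produced piece.
theorem pvGo_cur (sep : List Char) :
    ∀ (f : Nat) (l cur : List Char),
      PySem.Chars.splitOn.go sep f l cur [] =
        (cur.reverse ++ (PySem.Chars.splitOn.go sep f l [] []).headD []) ::
          (PySem.Chars.splitOn.go sep f l [] []).tail := by
  intro f
  induction f with
  | zero => intro l cur; rw [pvGo_zero, pvGo_zero]; simp
  | succ f ih =>
      intro l cur
      cases l with
      | nil => rw [pvGo_succ_nil, pvGo_succ_nil]; simp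
      | cons c rest =>
          rw [pvGo_succ_cons, pvGo_succ_cons]
          simp only [List.reverse_nil]
          split_ifs with h
          · rw [pvGo_acc sep f _ [] [cur.reverse], pvGo_acc sep f _ [] [[]]]
            simp
          · rw [ih rest (c :: cur), ih rest [c]]
            simp

-- splitOn structural recurrences (S0–S3).
theorem pvS0 (sep : List Char) : PySem.Chars.splitOn [] sep = [[]] := rfl

theorem pvS1 (sep rest : List Char) (hsep : sep ≠ []) :
    PySem.Chars.splitOn (sep ++ rest) sep = [] :: PySem.Chars.splitOn rest sep := by
  rcases sep with _ | ⟨a, sp⟩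
  · exact absurd rfl hsep
  · rw [pvSplitOn_eq_go]
    have hcons : (a :: sp) ++ rest = a :: (sp ++ rest) := by simp
    rw [hcons]
    rw [show (a :: (sp ++ rest)).length + 1 = ((a :: (sp ++ rest)).length) + 1 from rfl]
    rw [pvGo_succ_cons]
    rw [if_pos (List.isPrefixOf_iff_prefix.mpr (by rw [← hcons]; exact List.prefix_append _ _))]
    have hdrop : List.drop (a :: sp).length (a :: (sp ++ rest)) = rest := by
      simp only [List.length_cons, List.drop_succ_cons]
      simp [List.drop_left]
    simp only [List.reverse_nil]
    rw [hdrop, pvGo_acc _ _ _ _ [[]],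
        pvGo_fuel (a :: sp) (by simp) _ (rest.length + 1) rest [] []
          (by simp only [List.length_cons, List.length_append]; omega) (by omega)]
    rw [pvSplitOn_eq_go]
    simp

theorem pvS2 (sep : List Char) (c : Char) (l : List Char) (h : ¬ sep <+: (c :: l)) :
    PySem.Chars.splitOn (c :: l) sep =
      (c :: (PySem.Chars.splitOn l sep).headD []) :: (PySem.Chars.splitOn l sep).tail := by
  rw [pvSplitOn_eq_go, show (c :: l).length + 1 = l.length + 1 + 1 from by simp,
      pvGo_succ_cons, if_neg (fun hc => h (List.isPrefixOf_iff_prefix.mp hc)),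
      pvGo_cur sep (l.length + 1) l [c]]
  rw [pvSplitOn_eq_go]
  simp

theorem pvGo_head_prefix (sep : List Char) :
    ∀ (f : Nat) (l : List Char), l.length ≤ f →
      (PySem.Chars.splitOn.go sep f l [] []).headD [] <+: l := by
  intro f
  induction f with
  | zero =>
      intro l hf
      have hl : l = [] := by cases l <;> simp_all
      subst hl; rw [pvGo_zero]; simp
  | succ f ih =>
      intro l hf
      cases l with
      | nil => rw [pvGo_succ_nil]; simp
      | cons c rest =>
          rw [pvGo_succ_cons]
          simp only [List.reverse_nil]
          split_ifs with h
          · rw [pvGo_acc sep f _ [] [[]]]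
            simp
          · rw [pvGo_cur sep f rest [c]]
            simp only [List.reverse_cons, List.reverse_nil, List.nil_append, List.headD_cons,
              List.singleton_append]
            exact List.cons_prefix_cons.mpr ⟨rfl, ih rest (by simp only [List.length_cons] at hf; omega)⟩

theorem pvS3 (l sep : List Char) : (PySem.Chars.splitOn l sep).headD [] <+: l := by
  rw [pvSplitOn_eq_go]
  exact pvGo_head_prefix sep (l.length + 1) l (by omega)

theorem pvGo_single (sep : List Char) (hsep : sep ≠ []) (fuel : Nat) :
    ∀ (l cur : List Char) (acc : List (List Char)),
      ¬ sep <:+: (cur.reverse ++ l) → l.length ≤ fuel →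
      PySem.Chars.splitOn.go sep fuel l cur acc = acc.reverse ++ [cur.reverse ++ l] := by
  induction fuel with
  | zero =>
      intro l cur acc _ hlen
      have hl : l = [] := by cases l <;> simp_all
      subst hl
      rw [pvGo_zero]; simp
  | succ f ih =>
      intro l cur acc hinf hlen
      cases l with
      | nil => rw [pvGo_succ_nil]; simp
      | cons c rest =>
          rw [pvGo_succ_cons]
          have hnp : ¬ sep.isPrefixOf (c :: rest) = true := by
            intro h
            exact hinf (((List.isPrefixOf_iff_prefix.mp h).isInfix).trans
              (List.suffix_append cur.reverse (c :: rest)).isInfix)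
          rw [if_neg hnp]
          have hre : cur.reverse ++ c :: rest = (c :: cur).reverse ++ rest := by simp
          rw [ih rest (c :: cur) acc (by rw [← hre]; exact hinf)
            (by simp only [List.length_cons] at hlen; omega), hre]

theorem pvSplitOn_single (s sep : List Char) (hsep : sep ≠ []) (h : ¬ sep <:+: s) :
    PySem.Chars.splitOn s sep = [s] := by
  rw [pvSplitOn_eq_go, pvGo_single sep hsep _ s [] [] (by simpa using h) (by omega)]
  simp

theorem pvGo_nosep (sep : List Char) (hsep : sep ≠ []) (fuel : Nat) :
    ∀ (l cur : List Char) (acc : List (List Char)) (p : List Char),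
      (∀ suf, suf <:+ cur.reverse → suf ≠ [] → ¬ sep <+: (suf ++ l)) → l.length ≤ fuel →
      p ∈ PySem.Chars.splitOn.go sep fuel l cur acc →
      p ∈ acc ∨ ¬ sep <:+: p := by
  induction fuel with
  | zero =>
      intro l cur acc p H hlen hp
      have hl : l = [] := by cases l <;> simp_all
      subst hl
      rw [pvGo_zero, List.mem_reverse, List.mem_cons] at hp
      rcases hp with hp | hp
      · right
        rw [List.append_nil] at hp
        subst hp
        intro hinf
        rcases hinf with ⟨u, v, huv⟩
        refine H (sep ++ v) ?_ (by simp [hsep]) ?_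
        · rw [← huv, List.append_assoc]; exact List.suffix_append u (sep ++ v)
        · rw [List.append_nil]; exact List.prefix_append sep v
      · left; exact hp
  | succ f ih =>
      intro l cur acc p H hlen hp
      cases l with
      | nil =>
          rw [pvGo_succ_nil, List.mem_reverse, List.mem_cons] at hp
          rcases hp with hp | hp
          · right
            subst hp
            intro hinf
            rcases hinf with ⟨u, v, huv⟩
            refine H (sep ++ v) ?_ (by simp [hsep]) ?_
            · rw [← huv, List.append_assoc]; exact List.suffix_append u (sep ++ v)
            · rw [List.append_nil]; exact List.prefix_append sep v
          · left; exact hp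
      | cons c rest =>
          rw [pvGo_succ_cons] at hp
          split_ifs at hp with h
          · have hdrop : (List.drop sep.length (c :: rest)).length ≤ f := by
              have : (List.drop sep.length (c :: rest)).length =
                  (c :: rest).length - sep.length := List.length_drop
              have hs1 : 1 ≤ sep.length := by cases sep <;> simp_all
              simp only [List.length_cons] at this hlen ⊢; omega
            rcases ih _ [] (cur.reverse :: acc) p
                (by intro suf hsuf hne
                    rw [List.reverse_nil] at hsuf
                    exact absurd (List.suffix_nil.mp hsuf) hne) hdrop hp with hp | hp
            · rcases List.mem_cons.mp hp with hp | hp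
              · right
                subst hp
                intro hinf
                rcases hinf with ⟨u, v, huv⟩
                refine H (sep ++ v) ?_ (by simp [hsep]) ?_
                · rw [← huv, List.append_assoc]; exact List.suffix_append u (sep ++ v)
                · exact (List.prefix_append sep v).trans (List.prefix_append _ _)
              · left; exact hp
            · right; exact hp
          · refine ih rest (c :: cur) acc p ?_
              (by simp only [List.length_cons] at hlen; omega) hp
            intro suf hsuf hne
            have hsuf' : suf.reverse <+: (c :: cur.reverse.reverse) := by
              have := List.reverse_prefix.mpr hsuf
              simpa using this
            rcases List.prefix_cons_iff.mp hsuf' with h0 | ⟨l', hl', hl'p⟩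
            · exact absurd (by simpa using congrArg List.reverse h0) hne
            · have hsufeq : suf = l'.reverse ++ [c] := by
                have := congrArg List.reverse hl'
                simpa using this
              by_cases hl0 : l' = []
              · subst hl0
                rw [hsufeq]
                simpa using fun hc => h (List.isPrefixOf_iff_prefix.mpr hc)
              · have hl'suf : l'.reverse <:+ cur.reverse := by
                  rw [← List.reverse_reverse cur] at hl'p ⊢
                  exact List.reverse_prefix.mp (by simpa using hl'p)
                have := H l'.reverse hl'suf (by simpa using hl0)
                rw [hsufeq, List.append_assoc, List.singleton_append]
                exact this

theorem pvSplitOn_nosep (s sep p : List Char) (hsep : sep ≠ [])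
    (hp : p ∈ PySem.Chars.splitOn s sep) : ¬ sep <:+: p := by
  rw [pvSplitOn_eq_go] at hp
  rcases pvGo_nosep sep hsep (s.length+1) s [] [] p (by simp) (by omega) hp with h | h
  · simp at h
  · exact h

-- strip facts.
theorem pvDropWhile_prefix {p : Char → Bool} {x w : List Char}
    (hx : List.dropWhile p x = x) (hw : w <+: x) : List.dropWhile p w = w := by
  cases w with
  | nil => rfl
  | cons a w' =>
      cases x with
      | nil => exact absurd (List.eq_nil_of_prefix_nil hw) (by simp)
      | cons b x' =>
          have hab : a = b := by
            rcases hw with ⟨t, ht⟩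
            simpa using congrArg (fun l => l.head?) ht
          subst hab
          have hpa : p a = false := by
            by_cases hpa : p a = true
            · rw [List.dropWhile_cons, if_pos hpa] at hx
              have := congrArg List.length hx
              have hle := List.length_dropWhile_le p x'
              simp only [List.length_cons] at this
              omega
            · simpa using hpa
          rw [List.dropWhile_cons, if_neg (by simp [hpa])]

theorem pvLstrip_rstrip (y : List Char) (hy : PySem.Chars.lstrip y = y) :
    PySem.Chars.lstrip (PySem.Chars.rstrip y) = PySem.Chars.rstrip y := by
  unfold PySem.Chars.lstrip at hy ⊢
  refine pvDropWhile_prefix hy ?_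
  unfold PySem.Chars.rstrip
  have := List.reverse_prefix.mpr
    (List.dropWhile_suffix (l := y.reverse) (p := PySem.Chars.isspace))
  simpa using this

theorem pvStrip_idem (s : List Char) :
    PySem.Chars.strip (PySem.Chars.strip s) = PySem.Chars.strip s := by
  show PySem.Chars.rstrip (PySem.Chars.lstrip (PySem.Chars.rstrip (PySem.Chars.lstrip s))) = _
  rw [pvLstrip_rstrip _ (by unfold PySem.Chars.lstrip; exact List.dropWhile_idempotent _ _)]
  show PySem.Chars.rstrip (PySem.Chars.rstrip (PySem.Chars.lstrip s)) = _
  unfold PySem.Chars.rstrip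
  rw [List.reverse_reverse, List.dropWhile_idempotent]
  rfl

theorem pvStrip_paren (mid : List Char) :
    PySem.Chars.strip ('(' :: mid ++ [')']) = '(' :: mid ++ [')'] := by
  simp [PySem.Chars.strip, PySem.Chars.lstrip, PySem.Chars.rstrip,
    show PySem.Chars.isspace '(' = false from rfl, show PySem.Chars.isspace ')' = false from rfl,
    List.reverse_cons]

-- join in closed form.
theorem pvJoin_cons (E a : List Char) (l : List (List Char)) :
    PySem.Chars.join E (a :: l) = a ++ (l.map (fun x => E ++ x)).flatten := by
  induction l generalizing a with
  | nil => simp [PySem.Chars.join, List.intercalate]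
  | cons b t ih =>
      show (E.intercalate (a :: b :: t)) = _
      rw [show E.intercalate (a :: b :: t) = a ++ E ++ E.intercalate (b :: t) from by
            simp [List.intercalate, List.intersperse]]
      rw [show E.intercalate (b :: t) = PySem.Chars.join E (b :: t) from rfl, ih b]
      simp

-- A's and-accumulation loop in closed form.
theorem pvAndFold (f : List Char → List Char) (l : List (List Char)) :
    ∀ (a : List Char),
      l.foldl (fun ans p => ans ++ sAndL ++ f p) a =
      PySem.Chars.join sAndL (a :: l.map f) := by
  induction l with
  | nil => intro a; simp [PySem.Chars.join, List.intercalate]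
  | cons h t ih =>
      intro a
      rw [List.foldl_cons, ih, pvJoin_cons, pvJoin_cons]
      simp

-- The or-chain closed over a whole piece list (proof-level view of scanB's cur/buf state).
def pvOrStep (a q : List Char) : List Char := '(' :: (a ++ sOrL ++ PySem.Chars.strip q ++ [')'])

def chainAll : Option (List Char) → List (List Char) → List Char
  | cur, [] => closeChunk cur (PySem.Chars.strip [])
  | cur, [p] => closeChunk cur (PySem.Chars.strip p)
  | cur, p :: q :: qs => chainAll (some (closeChunk cur (PySem.Chars.strip p))) (q :: qs)

def segChunk (h : List Char) : List Char :=
  chainAll none (((PySem.Chars.splitOn h orL).headD []) :: (PySem.Chars.splitOn h orL).tail)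

theorem pvChain_some (qs : List (List Char)) :
    ∀ (a q : List Char), chainAll (some a) (q :: qs) = qs.foldl pvOrStep (pvOrStep a q) := by
  induction qs with
  | nil => intro a q; rfl
  | cons r rs ih =>
      intro a q
      rw [show chainAll (some a) (q :: r :: rs) =
            chainAll (some (closeChunk (some a) (PySem.Chars.strip q))) (r :: rs) from rfl,
          show closeChunk (some a) (PySem.Chars.strip q) = pvOrStep a q from rfl, ih]
      rfl

theorem pvChain_none (p : List Char) (ps : List (List Char)) :
    chainAll none (p :: ps) = ps.foldl pvOrStep (PySem.Chars.strip p) := by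
  cases ps with
  | nil => rfl
  | cons q qs =>
      rw [show chainAll none (p :: q :: qs) =
            chainAll (some (closeChunk none (PySem.Chars.strip p))) (q :: qs) from rfl,
          show closeChunk none (PySem.Chars.strip p) = PySem.Chars.strip p from rfl,
          pvChain_some]
      rfl

theorem pvFold_paren (qs : List (List Char)) (hqs : qs ≠ []) :
    ∀ (a : List Char), ∃ Z, qs.foldl pvOrStep a = '(' :: Z ++ [')'] := by
  induction qs with
  | nil => exact absurd rfl hqs
  | cons q rs ih =>
      intro a
      cases rs with
      | nil => exact ⟨a ++ sOrL ++ PySem.Chars.strip q, by simp [pvOrStep]⟩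
      | cons r rs' => exact ih (by simp) (pvOrStep a q)

theorem pvStrip_chain_none (p : List Char) (ps : List (List Char)) :
    PySem.Chars.strip (chainAll none (p :: ps)) = chainAll none (p :: ps) := by
  cases ps with
  | nil =>
      rw [show chainAll none [p] = PySem.Chars.strip p from rfl]
      exact pvStrip_idem p
  | cons q qs =>
      rw [pvChain_none]
      rcases pvFold_paren (q :: qs) (by simp) (PySem.Chars.strip p) with ⟨Z, hZ⟩
      rw [hZ]
      exact pvStrip_paren Z

theorem pvStrip_segChunk (h : List Char) :
    PySem.Chars.strip (segChunk h) = segChunk h := pvStrip_chain_none _ _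

theorem pvChain_one (cur : Option (List Char)) (p : List Char) :
    chainAll cur [p] = closeChunk cur (PySem.Chars.strip p) := rfl

theorem pvChain_cons (cur : Option (List Char)) (p q : List Char) (qs : List (List Char)) :
    chainAll cur (p :: q :: qs) =
      chainAll (some (closeChunk cur (PySem.Chars.strip p))) (q :: qs) := rfl

-- On an 'and'-free piece, A's solve is exactly the or-chain of that piece.
theorem pvSegA (p : List Char) (hp : ¬ andL <:+: p) : solveChars p = segChunk p := by
  by_cases hnil : p = []
  · subst hnil
    rw [solveChars]
    simp only [dif_pos rfl]
    rw [show segChunk [] = PySem.Chars.strip [] from rfl]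
    simp [PySem.Chars.strip, PySem.Chars.lstrip, PySem.Chars.rstrip]
  · rw [solveChars, dif_neg hnil, dif_pos ((PySem.Chars.isIn_eq_false_iff andL p).mpr hp)]
    by_cases hor : orL <:+: p
    · rw [dif_neg (show ¬ PySem.Chars.isIn orL p = false from
        fun hf => ((PySem.Chars.isIn_eq_false_iff orL p).mp hf) hor)]
      dsimp only
      rw [show (fun (ans q : List Char) =>
            '(' :: (ans ++ sOrL ++ PySem.Chars.strip q ++ [')'])) = pvOrStep from rfl,
          ← pvChain_none]
      exact pvStrip_segChunk p
    · rw [dif_pos ((PySem.Chars.isIn_eq_false_iff orL p).mpr hor)]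
      rw [show segChunk p = chainAll none ((PySem.Chars.splitOn p orL).headD [] ::
            (PySem.Chars.splitOn p orL).tail) from rfl,
          pvSplitOn_single p orL (by simp [orL]) hor]
      rfl

-- A's solve in split form: ' and '-join of the or-chains of the 'and'-pieces.
theorem pvAmain (s : List Char) (hs : s ≠ []) :
    solveChars s =
      PySem.Chars.strip (PySem.Chars.join sAndL
        ((PySem.Chars.splitOn s andL).map segChunk)) := by
  by_cases hin : andL <:+: s
  · have hisin : PySem.Chars.isIn andL s = true := (PySem.Chars.isIn_iff_infix andL s).mpr hin
    rw [solveChars, dif_neg hs, dif_neg (by rw [hisin]; simp)]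
    dsimp only
    rw [List.foldl_attach (l := (PySem.Chars.splitOn s andL).tail)
      (f := fun ans q => ans ++ sAndL ++ solveChars q)]
    have hcong : List.foldl (fun ans q => ans ++ sAndL ++ solveChars q)
        (solveChars ((PySem.Chars.splitOn s andL).headD []))
        (PySem.Chars.splitOn s andL).tail
        = List.foldl (fun ans q => ans ++ sAndL ++ segChunk q)
        (solveChars ((PySem.Chars.splitOn s andL).headD []))
        (PySem.Chars.splitOn s andL).tail :=
      PySem.List.foldl_congr_mem _ _ _ _ (fun acc x hx => by
        rw [pvSegA x (pvSplitOn_nosep s andL x (by simp [andL])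
          (List.mem_of_mem_tail hx))])
    rw [hcong]
    rw [pvSegA ((PySem.Chars.splitOn s andL).headD [])
      (pvSplitOn_nosep s andL _ (by simp [andL])
        (pvHeadD_mem _ _ (pvSplitOn_ne_nil s andL)))]
    rw [pvAndFold segChunk]
    rcases hsp : PySem.Chars.splitOn s andL with _ | ⟨hd, t⟩
    · exact absurd hsp (pvSplitOn_ne_nil s andL)
    · simp
  · rw [pvSplitOn_single s andL (by simp [andL]) hin, pvSegA s hin]
    simp only [List.map_cons, List.map_nil]
    rw [show PySem.Chars.join sAndL [segChunk s] = segChunk s from by rw [pvJoin_cons]; simp]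
    exact (pvStrip_segChunk s).symm

-- scanB's invariant: the scan to come is determined by the splits of the unread input,
-- with the buffered piece prefixes attached to the first or-piece.
theorem pvBnil (out : List (List Char)) (cur : Option (List Char)) (buf : List Char) :
    scanB [] out cur buf =
      PySem.Chars.strip (PySem.Chars.join sAndL (out.reverse ++
        chainAll cur ((buf.reverse ++
            (PySem.Chars.splitOn ((PySem.Chars.splitOn ([] : List Char) andL).headD []) orL).headD []) ::
          (PySem.Chars.splitOn ((PySem.Chars.splitOn ([] : List Char) andL).headD []) orL).tail) ::
        ((PySem.Chars.splitOn ([] : List Char) andL).tail).map segChunk)) := by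
  rw [scanB]
  simp only [pvS0, List.headD_cons, List.tail_cons, List.map_nil, List.append_nil,
    List.reverse_cons, pvChain_one]

theorem pvBmain (n : Nat) : ∀ (s : List Char), s.length ≤ n →
    ∀ (out : List (List Char)) (cur : Option (List Char)) (buf : List Char),
      scanB s out cur buf =
        PySem.Chars.strip (PySem.Chars.join sAndL (out.reverse ++
          chainAll cur ((buf.reverse ++
              (PySem.Chars.splitOn ((PySem.Chars.splitOn s andL).headD []) orL).headD []) ::
            (PySem.Chars.splitOn ((PySem.Chars.splitOn s andL).headD []) orL).tail) ::
          ((PySem.Chars.splitOn s andL).tail).map segChunk)) := by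
  induction n with
  | zero =>
      intro s hlen out cur buf
      have hs : s = [] := by cases s <;> simp_all
      subst hs
      exact pvBnil out cur buf
  | succ n ih =>
      intro s hlen out cur buf
      cases s with
      | nil => exact pvBnil out cur buf
      | cons c rest =>
          rw [scanB]
          split_ifs with hA hO
          · -- 'and' matches here
            obtain ⟨r2, hr2⟩ := List.isPrefixOf_iff_prefix.mp hA
            have hdrop : (c :: rest).drop 3 = r2 := by rw [← hr2]; rfl
            have hr2len : r2.length ≤ n := by
              have := congrArg List.length hr2
              simp only [List.length_append, List.length_cons] at this hlen
              simp [andL] at this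
              omega
            rw [hdrop, ih r2 hr2len
              (closeChunk cur (PySem.Chars.strip buf.reverse) :: out) none []]
            rw [show (c :: rest) = andL ++ r2 from hr2.symm,
                pvS1 andL r2 (by simp [andL])]
            rcases hsp : PySem.Chars.splitOn r2 andL with _ | ⟨h2, t2⟩
            · exact absurd hsp (pvSplitOn_ne_nil r2 andL)
            · simp only [List.headD_cons, List.tail_cons, pvS0, List.append_nil,
                List.reverse_nil, List.nil_append, List.reverse_cons, List.map_cons,
                pvChain_one]
              rw [show chainAll none ((PySem.Chars.splitOn h2 orL).headD [] ::
                    (PySem.Chars.splitOn h2 orL).tail) = segChunk h2 from rfl]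
              simp [List.append_assoc]
          · -- 'or' matches here
            obtain ⟨r2, hr2⟩ := List.isPrefixOf_iff_prefix.mp hO
            have hc : c = 'o' := by injection hr2 with h1 _; exact h1.symm
            have hrest : rest = 'r' :: r2 := by injection hr2 with _ h2; exact h2.symm
            subst hc; subst hrest
            have hdrop : (('o' : Char) :: 'r' :: r2).drop 2 = r2 := rfl
            have hr2len : r2.length ≤ n := by
              simp only [List.length_cons] at hlen; omega
            rw [hdrop, ih r2 hr2len out
              (some (closeChunk cur (PySem.Chars.strip buf.reverse))) []]
            have hnand1 : ¬ andL <+: ('o' :: 'r' :: r2) :=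
              fun hc => hA (List.isPrefixOf_iff_prefix.mpr hc)
            have hnand2 : ¬ andL <+: ('r' :: r2) := by
              intro hc
              rcases List.cons_prefix_cons.mp hc with ⟨h1, _⟩
              exact absurd h1 (by decide)
            rw [pvS2 andL 'o' ('r' :: r2) hnand1, pvS2 andL 'r' r2 hnand2]
            simp only [List.headD_cons, List.tail_cons]
            rw [show ('o' :: 'r' :: (PySem.Chars.splitOn r2 andL).headD [] : List Char) =
                  orL ++ (PySem.Chars.splitOn r2 andL).headD [] from rfl,
                pvS1 orL _ (by simp [orL])]
            simp only [List.headD_cons, List.tail_cons, List.append_nil, List.reverse_nil,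
              List.nil_append]
            rcases hq : PySem.Chars.splitOn ((PySem.Chars.splitOn r2 andL).headD []) orL
              with _ | ⟨q0, qs⟩
            · exact absurd hq (pvSplitOn_ne_nil _ orL)
            · simp only [List.headD_cons, List.tail_cons, pvChain_cons]
          · -- plain character
            have hlen' : rest.length ≤ n := by
              simp only [List.length_cons] at hlen; omega
            rw [ih rest hlen' out cur (c :: buf)]
            have hnand : ¬ andL <+: (c :: rest) :=
              fun hc => hA (List.isPrefixOf_iff_prefix.mpr hc)
            rw [pvS2 andL c rest hnand]
            simp only [List.headD_cons, List.tail_cons]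
            have hnor : ¬ orL <+: (c :: (PySem.Chars.splitOn rest andL).headD []) := by
              intro hc
              rcases List.cons_prefix_cons.mp hc with ⟨h1, h2⟩
              exact hO (List.isPrefixOf_iff_prefix.mpr
                (List.cons_prefix_cons.mpr ⟨h1, h2.trans (pvS3 rest andL)⟩))
            rw [pvS2 orL c _ hnor]
            simp only [List.headD_cons, List.tail_cons, List.reverse_cons,
              List.append_assoc, List.cons_append, List.nil_append]

-- ===== VERDICT (by name: the statement is the Claim_ definition above) =====
theorem pvMain (s : List Char) : solveChars s = solveAltChars s := by
  by_cases hnil : s = []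
  · subst hnil
    rw [solveChars]
    simp [solveAltChars]
  · unfold solveAltChars
    rw [if_neg hnil, pvBmain s.length s (le_refl _) [] none [], pvAmain s hnil]
    rcases hsp : PySem.Chars.splitOn s andL with _ | ⟨h, t⟩
    · exact absurd hsp (pvSplitOn_ne_nil s andL)
    · simp only [List.headD_cons, List.tail_cons, List.reverse_nil, List.nil_append,
        List.map_cons]
      rw [show chainAll none ((PySem.Chars.splitOn h orL).headD [] ::
            (PySem.Chars.splitOn h orL).tail) = segChunk h from rfl]

theorem solve_spec : Claim_equal_solve := by
  intro s _
  unfold Spec_solve solve solve_alt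
  rw [pvMain]
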